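-- pv_equiv track=rewrite | github.com/Dirty13itch/athanor | scripts/generate_rfi_hers_primary_root_stabilization_packet.py | _group_counts
-- ===== SOURCE A (Python) =====
-- from collections import Counter
--
-- def _group_counts(paths: list[str]) -> dict[str, int]:
--     grouped = Counter()
--     for path in paths:
--         parts = path.split("/")
--         if len(parts) == 1:
--             grouped[path] += 1
--             continue
--         grouped["/".join(parts[: min(3, len(parts))])] += 1
--     return dict(sorted(grouped.items(), key=lambda item: (-item[1], item[0])))
-- ===== SOURCE B (Python) =====
-- from itertools import groupby
--
--
-- def _group_counts(paths: list[str]) -> dict[str, int]: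
--     keys = sorted("/".join(p.split("/")[:3]) for p in paths)
--     pairs = [(k, len(list(run))) for k, run in groupby(keys)]
--     pairs.sort(key=lambda kv: (-kv[1], kv[0]))
--     return dict(pairs)
-- ===== Notes on version B (the rewrite author's own statement) =====
-- stated objective: alternative
-- what changed: Replaces A's Counter (hash-map) accumulation over branchy keys by mapping every path to its group key, sorting the keys, and counting maximal runs of adjacent equal keys (itertools.groupby), before the same final (-count, key) sort.
import Mathlib
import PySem

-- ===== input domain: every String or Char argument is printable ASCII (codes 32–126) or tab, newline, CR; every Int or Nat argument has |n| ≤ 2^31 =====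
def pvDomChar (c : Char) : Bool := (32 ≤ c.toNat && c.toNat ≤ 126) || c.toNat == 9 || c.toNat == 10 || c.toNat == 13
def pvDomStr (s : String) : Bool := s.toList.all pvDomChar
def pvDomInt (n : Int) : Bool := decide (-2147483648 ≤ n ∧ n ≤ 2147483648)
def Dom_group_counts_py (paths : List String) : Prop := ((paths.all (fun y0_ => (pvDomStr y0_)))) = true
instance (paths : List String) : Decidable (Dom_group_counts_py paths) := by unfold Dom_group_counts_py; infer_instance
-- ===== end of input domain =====

-- B replaces A's Counter (hash-map) accumulation by sort-then-adjacent-run counting (sorted keys + groupby);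
-- objective: alternative algorithm of similar cost. Equivalence of the return value is proved below.

-- ===== PORT A =====
-- literal port of A: Counter loop (dict modify with default 0), then sorted(items, key=(-count, key)).
def group_counts_py (paths : List String) : List (String × Int) :=
  let grouped : PySem.Dict String Int :=
    paths.foldl (fun d path =>
      let parts := (PySem.Str.split? path "/").getD []   -- "/" is non-empty, so split? is always `some`
      if parts.length == 1 then
        d.modify path 0 (fun v => v + 1)
      else
        d.modify (PySem.Str.join "/" (PySem.List.slice parts none (some (min 3 (parts.length : Int))))) 0 (fun v => v + 1))
      PySem.Dict.empty
  PySem.List.sorted2 grouped.items (fun item => -item.2) (fun item => item.1)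

-- ===== PORT B =====
-- B's group key: "/".join(p.split("/")[:3])
def pvKey (p : String) : String :=
  PySem.Str.join "/" (PySem.List.slice ((PySem.Str.split? p "/").getD []) none (some 3))

-- hand port of the itertools.groupby counting pass: run-length encoding of adjacent equal keys
-- (exact: groupby on a list yields exactly the maximal runs of adjacent equal elements, each with its length).
def pvRuns : List String → List (String × Int)
  | [] => []
  | k :: rest =>
    match pvRuns rest with
    | [] => [(k, 1)]
    | (k', c) :: t => if k = k' then (k', c + 1) :: t else (k, 1) :: (k', c) :: t

def group_counts_py_alt (paths : List String) : List (String × Int) :=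
  let keys := PySem.List.sorted (paths.map pvKey) (fun x => x)
  let pairs := pvRuns keys
  PySem.List.sorted2 pairs (fun kv => -kv.2) (fun kv => kv.1)

-- ===== PRECONDITION & SPEC =====
def Spec_group_counts_py (paths : List String) (out : List (String × Int)) : Prop := out = group_counts_py_alt paths
instance (paths : List String) (out : List (String × Int)) : Decidable (Spec_group_counts_py paths out) := by unfold Spec_group_counts_py; infer_instance

-- ===== CLAIM (what is proved, stated in full; the proofs are below) =====
def Claim_equal_group_counts_py : Prop := ∀ (paths : List String), Dom_group_counts_py paths → Spec_group_counts_py paths (group_counts_py paths)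

-- ===== LEMMAS AND PROOFS =====

-- The comparison used by both final sorts: Python's tuple key (-count, key), lexicographically.
def pvBefore (a b : String × Int) : Bool :=
  decide (-a.2 < -b.2) || (!decide (-b.2 < -a.2) && decide (a.1 < b.1))

lemma pvBefore_iff (a b : String × Int) :
    pvBefore a b = true ↔ (-a.2 < -b.2 ∨ (¬(-b.2 < -a.2) ∧ a.1 < b.1)) := by
  simp [pvBefore]

lemma pvBefore_asym (a b : String × Int) (h : pvBefore a b = true) : pvBefore b a = false := by
  rw [pvBefore_iff] at h
  rw [← Bool.not_eq_true, pvBefore_iff]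
  intro hc
  rcases h with h | ⟨h1, h2⟩ <;> rcases hc with hc | ⟨hc1, hc2⟩
  · omega
  · exact hc1 h
  · exact h1 hc
  · exact lt_asymm h2 hc2

lemma pvLe_trans (a b c : String × Int) (hba : pvBefore b a = false) (hcb : pvBefore c b = false) :
    pvBefore c a = false := by
  rw [← Bool.not_eq_true, pvBefore_iff] at hba hcb
  rw [← Bool.not_eq_true, pvBefore_iff]
  intro hca
  have h1 : ¬(-b.2 < -a.2) := fun h => hba (Or.inl h)
  have h2 : ¬(-c.2 < -b.2) := fun h => hcb (Or.inl h)
  rcases hca with hca | ⟨hn, hs⟩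
  · omega
  · have ha1 : ¬(b.1 < a.1) := fun h => hba (Or.inr ⟨by omega, h⟩)
    have hb1 : ¬(c.1 < b.1) := fun h => hcb (Or.inr ⟨by omega, h⟩)
    exact absurd hs (not_lt.mpr (le_trans (not_lt.mp ha1) (not_lt.mp hb1)))

lemma pvLe_antisym (a b : String × Int) (hab : pvBefore a b = false) (hba : pvBefore b a = false) :
    a = b := by
  rw [← Bool.not_eq_true, pvBefore_iff] at hab hba
  have h1 : ¬(-a.2 < -b.2) := fun h => hab (Or.inl h)
  have h2 : ¬(-b.2 < -a.2) := fun h => hba (Or.inl h)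
  have hsnd : a.2 = b.2 := by omega
  have ha1 : ¬(a.1 < b.1) := fun h => hab (Or.inr ⟨by omega, h⟩)
  have hb1 : ¬(b.1 < a.1) := fun h => hba (Or.inr ⟨by omega, h⟩)
  exact Prod.ext (le_antisymm (not_lt.mp hb1) (not_lt.mp ha1)) hsnd

lemma insertBy_pairwise_pvLe (x : String × Int) (ys : List (String × Int))
    (hys : ys.Pairwise (fun a b => pvBefore b a = false)) :
    (PySem.List.insertBy pvBefore x ys).Pairwise (fun a b => pvBefore b a = false) := by
  induction ys with
  | nil => simp [PySem.List.insertBy]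
  | cons y ys ih =>
    rw [List.pairwise_cons] at hys
    obtain ⟨hy, hys'⟩ := hys
    by_cases hxy : pvBefore x y = true
    · simp only [PySem.List.insertBy, hxy, if_true]
      rw [List.pairwise_cons]
      refine ⟨?_, List.pairwise_cons.mpr ⟨hy, hys'⟩⟩
      intro z hz
      rcases List.mem_cons.mp hz with rfl | hz'
      · exact pvBefore_asym x z hxy
      · exact pvLe_trans x y z (pvBefore_asym x y hxy) (hy z hz')
    · have hxy' : pvBefore x y = false := by
        cases h : pvBefore x y with
        | false => rfl
        | true => exact absurd h hxy
      simp only [PySem.List.insertBy, hxy', Bool.false_eq_true, if_false]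
      rw [List.pairwise_cons]
      refine ⟨?_, ih hys'⟩
      intro z hz
      rcases (PySem.List.insertBy_mem_iff pvBefore x z ys).mp hz with rfl | hz'
      · exact hxy'
      · exact hy z hz'

lemma foldl_insertBy_pairwise_pvLe (xs : List (String × Int)) :
    ∀ acc : List (String × Int), acc.Pairwise (fun a b => pvBefore b a = false) →
      (xs.foldl (fun acc x => PySem.List.insertBy pvBefore x acc) acc).Pairwise
        (fun a b => pvBefore b a = false) := by
  induction xs with
  | nil => intro acc h; simpa using h
  | cons x xs ih =>
    intro acc h
    simpa [List.foldl_cons] using ih _ (insertBy_pairwise_pvLe x acc h)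

lemma sorted2_eq_foldl_pv (xs : List (String × Int)) :
    PySem.List.sorted2 xs (fun it => -it.2) (fun it => it.1) =
      xs.foldl (fun acc x => PySem.List.insertBy pvBefore x acc) [] := rfl

lemma sorted2_pairwise_pvLe (xs : List (String × Int)) :
    (PySem.List.sorted2 xs (fun it => -it.2) (fun it => it.1)).Pairwise
      (fun a b => pvBefore b a = false) := by
  rw [sorted2_eq_foldl_pv]
  exact foldl_insertBy_pairwise_pvLe xs [] (by simp)

-- the final sort is determined by the multiset of pairs: equal inputs-up-to-permutation sort equally.
lemma sorted2_eq_of_perm (xs ys : List (String × Int)) (h : xs.Perm ys) :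
    PySem.List.sorted2 xs (fun it => -it.2) (fun it => it.1) =
      PySem.List.sorted2 ys (fun it => -it.2) (fun it => it.1) := by
  apply List.Perm.eq_of_pairwise (le := fun a b => pvBefore b a = false)
  · intro a b _ _ hab hba
    exact pvLe_antisym a b hba hab
  · exact sorted2_pairwise_pvLe xs
  · exact sorted2_pairwise_pvLe ys
  · exact ((PySem.List.sorted2_perm xs _ _ false).trans h).trans
      (PySem.List.sorted2_perm ys _ _ false).symm

-- ---- split/join facts needed to collapse A's len==1 branch ----

lemma splitOn_go_length (sep : List Char) :
    ∀ (fuel : Nat) (l cur : List Char) (acc : List (List Char)),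
      acc.length + 1 ≤ (PySem.Chars.splitOn.go sep fuel l cur acc).length := by
  intro fuel
  induction fuel with
  | zero => intro l cur acc; simp [PySem.Chars.splitOn.go]
  | succ n ih =>
    intro l cur acc
    cases l with
    | nil => simp [PySem.Chars.splitOn.go]
    | cons c rest =>
      simp only [PySem.Chars.splitOn.go]
      split
      · have := ih (List.drop sep.length (c :: rest)) [] (cur.reverse :: acc)
        simp at this ⊢
        omega
      · exact ih rest (c :: cur) acc

lemma splitOn_go_singleton (sep : List Char) :
    ∀ (fuel : Nat) (l cur : List Char) (acc : List (List Char)) (x : List Char),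
      PySem.Chars.splitOn.go sep fuel l cur acc = [x] → acc = [] ∧ x = cur.reverse ++ l := by
  intro fuel
  induction fuel with
  | zero =>
    intro l cur acc x h
    simp only [PySem.Chars.splitOn.go] at h
    cases acc with
    | nil => simp at h; exact ⟨rfl, h.symm⟩
    | cons a0 acc' =>
      exfalso
      have hl := congrArg List.length h
      simp at hl
  | succ n ih =>
    intro l cur acc x h
    cases l with
    | nil =>
      simp only [PySem.Chars.splitOn.go] at h
      cases acc with
      | nil => simp at h; exact ⟨rfl, by simp [h.symm]⟩
      | cons a0 acc' =>
        exfalso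
        have hl := congrArg List.length h
        simp at hl
    | cons c rest =>
      simp only [PySem.Chars.splitOn.go] at h
      split at h
      · exfalso
        have := splitOn_go_length sep n (List.drop sep.length (c :: rest)) [] (cur.reverse :: acc)
        rw [h] at this
        simp at this
      · obtain ⟨h1, h2⟩ := ih rest (c :: cur) acc x h
        refine ⟨h1, ?_⟩
        simpa using h2

lemma splitOn_singleton (s sep : List Char) (x : List Char)
    (h : PySem.Chars.splitOn s sep = [x]) : x = s := by
  unfold PySem.Chars.splitOn at h
  obtain ⟨-, h2⟩ := splitOn_go_singleton sep (s.length + 1) s [] [] x h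
  simpa using h2

-- A's per-path key (the branchy form) equals B's pvKey.
lemma keyA_eq_pvKey (p : String) :
    (let parts := (PySem.Str.split? p "/").getD []
     if parts.length == 1 then p
     else PySem.Str.join "/" (PySem.List.slice parts none (some (min 3 (parts.length : Int))))) =
    pvKey p := by
  have hsep : ("/" : String).toList = ['/'] := rfl
  have hsplit : PySem.Str.split? p "/" =
      some ((PySem.Chars.splitOn p.toList ['/']).map String.ofList) := by
    simp [PySem.Str.split?, PySem.Chars.split?, hsep]
  set css := PySem.Chars.splitOn p.toList ['/'] with hcss
  have hparts : (PySem.Str.split? p "/").getD [] = css.map String.ofList := by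
    rw [hsplit]; rfl
  simp only [hparts]
  by_cases h1 : (css.map String.ofList).length = 1
  · -- the singleton case: the joined prefix is the whole string p
    rw [List.length_map] at h1
    obtain ⟨y, hy⟩ := List.length_eq_one_iff.mp h1
    have hyp : y = p.toList := splitOn_singleton p.toList ['/'] y (hcss ▸ hy)
    have hTrue : ((css.map String.ofList).length == 1) = true := by
      simp [hy]
    rw [hTrue, if_pos rfl]
    unfold pvKey
    rw [hparts, hy, hyp]
    simp only [List.map_cons, List.map_nil]
    have : PySem.List.slice [String.ofList p.toList] none (some 3) = [String.ofList p.toList] := by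
      rw [PySem.List.slice_to _ (by norm_num)]
      simp
    rw [this]
    simp [PySem.Str.join, PySem.Chars.join_singleton]
  · have hFalse : ((css.map String.ofList).length == 1) = false := by
      simp only [beq_eq_false_iff_ne, ne_eq]
      exact h1
    rw [hFalse, if_neg (by simp)]
    unfold pvKey
    rw [hparts]
    congr 1
    have hmin : (0 : Int) ≤ min 3 ((css.map String.ofList).length : Int) := by
      have : (0 : Int) ≤ ((css.map String.ofList).length : Int) := by positivity
      omega
    rw [PySem.List.slice_to _ hmin, PySem.List.slice_to _ (by norm_num)]
    have h3 : (min 3 ((css.map String.ofList).length : Int)).toNat =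
        min 3 (css.map String.ofList).length := by omega
    rw [show (3 : Int).toNat = 3 from rfl, h3]
    rw [← List.take_take, List.take_length]

-- A's Counter loop is Counter(map pvKey paths).
lemma grouped_eq_counter (paths : List String) :
    paths.foldl (fun d path =>
      let parts := (PySem.Str.split? path "/").getD []
      if parts.length == 1 then
        d.modify path 0 (fun v => v + 1)
      else
        d.modify (PySem.Str.join "/" (PySem.List.slice parts none (some (min 3 (parts.length : Int))))) 0 (fun v => v + 1))
      PySem.Dict.empty = PySem.Dict.counter (paths.map pvKey) := by
  rw [PySem.Dict.counter_eq_foldl, List.foldl_map]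
  congr 1
  funext d p
  have hcollapse :
      (let parts := (PySem.Str.split? p "/").getD []
       if parts.length == 1 then
         d.modify p 0 (fun v => v + 1)
       else
         d.modify (PySem.Str.join "/" (PySem.List.slice parts none (some (min 3 (parts.length : Int))))) 0 (fun v => v + 1)) =
      d.modify
        (let parts := (PySem.Str.split? p "/").getD []
         if parts.length == 1 then p
         else PySem.Str.join "/" (PySem.List.slice parts none (some (min 3 (parts.length : Int)))))
        0 (fun v => v + 1) := by
    simp only []
    split <;> rfl
  rw [hcollapse, keyA_eq_pvKey]

-- run-length encoding of a ≤-sorted list is (distinct keys in order, multiplicities).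
lemma pvRuns_sorted (ys : List String) (hs : ys.Pairwise (· ≤ ·)) :
    pvRuns ys = (PySem.Set.ofList ys).map (fun k => (k, (ys.count k : Int))) := by
  induction ys with
  | nil => simp [pvRuns, PySem.Set.ofList_nil]
  | cons k rest ih =>
    rw [List.pairwise_cons] at hs
    obtain ⟨hk, hrest⟩ := hs
    have ihr := ih hrest
    by_cases hmem : k ∈ rest
    · -- rest starts with k
      cases rest with
      | nil => simp at hmem
      | cons h t =>
        have hhk : h = k := by
          have h1 : k ≤ h := hk h (by simp)
          rcases List.mem_cons.mp hmem with rfl | hkt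
          · rfl
          · have h2 : h ≤ k := (List.pairwise_cons.mp hrest).1 k hkt
            exact le_antisymm h2 h1
        subst hhk
        -- ofList (h::h::t) = ofList (h::t), and pvRuns merges the head
        have hof : PySem.Set.ofList (h :: h :: t) = PySem.Set.ofList (h :: t) := by
          rw [PySem.Set.ofList_cons, PySem.Set.ofList_cons]
          congr 1
          simp only [PySem.Set.discard]
          rw [List.filter_cons]
          simp
        have hofcons : PySem.Set.ofList (h :: t) =
            h :: (PySem.Set.ofList t).discard h := PySem.Set.ofList_cons h t
        rw [hof]
        -- LHS: pvRuns (h :: h :: t)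
        have hhead : pvRuns (h :: t) =
            (h, ((h :: t).count h : Int)) ::
              ((PySem.Set.ofList t).discard h).map (fun j => (j, ((h :: t).count j : Int))) := by
          rw [ihr, hofcons]; rfl
        show pvRuns (h :: (h :: t)) = _
        rw [show pvRuns (h :: (h :: t)) =
              (match pvRuns (h :: t) with
               | [] => [(h, 1)]
               | (k', c) :: t' => if h = k' then (k', c + 1) :: t' else (h, 1) :: (k', c) :: t')
            from rfl, hhead]
        dsimp only
        rw [if_pos rfl, hofcons]
        simp only [List.map_cons]
        congr 1
        · -- heads: count h (h::h::t) = count h (h::t) + 1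
          simp
        · -- tails: entries j ≠ h have equal counts
          apply List.map_congr_left
          intro j hj
          have hjne : j ≠ h := ((PySem.Set.mem_discard _ _ _).mp hj).2
          have : (h :: h :: t).count j = (h :: t).count j := by
            simp [Ne.symm hjne]
          rw [this]
    · -- k not in rest: new head group of size 1
      have hof : PySem.Set.ofList (k :: rest) = k :: PySem.Set.ofList rest := by
        rw [PySem.Set.ofList_cons]
        congr 1
        simp only [PySem.Set.discard]
        rw [List.filter_eq_self]
        intro a ha
        have : a ∈ rest := (PySem.Set.mem_ofList rest a).mp ha
        simp
        intro hak
        exact hmem (hak ▸ this)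
      rw [hof, List.map_cons]
      have hcntk : (k :: rest).count k = 1 := by
        simp [List.count_eq_zero.mpr hmem]
      have htail : (PySem.Set.ofList rest).map (fun j => (j, ((k :: rest).count j : Int))) =
          (PySem.Set.ofList rest).map (fun j => (j, (rest.count j : Int))) := by
        apply List.map_congr_left
        intro j hj
        have hjr : j ∈ rest := (PySem.Set.mem_ofList rest j).mp hj
        have hjne : j ≠ k := fun h => hmem (h ▸ hjr)
        simp [Ne.symm hjne]
      rw [hcntk, htail, ← ihr]
      -- LHS: pvRuns (k :: rest) with head key of pvRuns rest ≠ k (or rest empty)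
      cases rest with
      | nil => rfl
      | cons h t =>
        have hof2 : PySem.Set.ofList (h :: t) = h :: (PySem.Set.ofList t).discard h :=
          PySem.Set.ofList_cons h t
        have hhead : pvRuns (h :: t) =
            (h, ((h :: t).count h : Int)) ::
              ((PySem.Set.ofList t).discard h).map (fun j => (j, ((h :: t).count j : Int))) := by
          rw [ihr, hof2]; rfl
        have hkh : k ≠ h := fun hkh => hmem (hkh ▸ (by simp : h ∈ h :: t))
        show (match pvRuns (h :: t) with
               | [] => [(k, 1)]
               | (k', c) :: t' => if k = k' then (k', c + 1) :: t' else (k, 1) :: (k', c) :: t') = _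
        rw [hhead]
        simp only [if_neg hkh]
        rw [← hhead]
        norm_num
-- final assembly
lemma group_counts_main (paths : List String) :
    group_counts_py paths = group_counts_py_alt paths := by
  unfold group_counts_py group_counts_py_alt
  simp only []
  rw [grouped_eq_counter]
  set keys0 := paths.map pvKey with hkeys0
  rw [PySem.Dict.items_counter]
  set ys := PySem.List.sorted keys0 (fun x => x) with hys
  have hperm : ys.Perm keys0 := PySem.List.sorted_perm keys0 (fun x => x) false
  have hsortedys : ys.Pairwise (· ≤ ·) := by
    have := PySem.List.sorted_pairwise keys0 (fun x => x)
    simpa using this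
  rw [pvRuns_sorted ys hsortedys]
  apply sorted2_eq_of_perm
  -- map f (ofList keys0) ~ map g (ofList ys) with f = g pointwise (counts equal) and ofList ~ ofList
  have hcount : ∀ j : String, ys.count j = keys0.count j := fun j => hperm.count_eq j
  have hmapeq : (PySem.Set.ofList ys).map (fun k => (k, (ys.count k : Int))) =
      (PySem.Set.ofList ys).map (fun k => (k, (keys0.count k : Int))) := by
    apply List.map_congr_left
    intro j _
    rw [hcount j]
  rw [hmapeq]
  apply List.Perm.map
  rw [List.perm_ext_iff_of_nodup (PySem.Set.nodup_ofList keys0) (PySem.Set.nodup_ofList ys)]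
  intro a
  rw [PySem.Set.mem_ofList, PySem.Set.mem_ofList]
  exact (hperm.mem_iff).symm

-- ===== VERDICT (by name: the statement is the Claim_ definition above) =====
theorem group_counts_py_spec : Claim_equal_group_counts_py := by
  intro paths _
  unfold Spec_group_counts_py
  exact group_counts_main paths
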